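-- pv_equiv track=rewrite | github.com/UChiSeclab/wedge | code-contest-exp/manual_legacy_experiment/769_D/exp_2/gen.py | frequent_xor_pairs
-- ===== SOURCE A (Python) =====
-- def frequent_xor_pairs(max_val, bit_dif, count):
--     """
--     Find pairs of numbers that result in exactly 'bit_dif' bits different when XORed.
--     :param max_val: Maximum value for array elements.
--     :param bit_dif: The desired bit difference.
--     :param count: Number of each number to include for frequency.
--     :return: List of numbers maximizing the condition.
--     """
--     pairs = []
--     for i in range(1, max_val + 1):
--         for j in range(i, max_val + 1):
--             if bin(i ^ j).count('1') == bit_dif: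
--                 pairs.extend([i] * count)
--                 if i != j:
--                     pairs.extend([j] * count)
--     return pairs
-- ===== SOURCE B (Python) =====
-- def frequent_xor_pairs(max_val, bit_dif, count):
--     """
--     Same result as A, but per i we enumerate only the XOR masks with exactly
--     bit_dif one-bits (precomputed once) instead of scanning all j.
--     """
--     if max_val < 1:
--         return []
--     width = max_val.bit_length()
--     masks = [m for m in range(1 << width) if bin(m).count('1') == bit_dif]
--     out = []
--     for i in range(1, max_val + 1):
--         for j in sorted([i ^ m for m in masks if i <= i ^ m <= max_val]):
--             out += [i] * count
--             if j != i:
--                 out += [j] * count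
--     return out
-- ===== Notes on version B (the rewrite author's own statement) =====
-- stated objective: faster
-- what changed: Instead of testing every pair (i,j) with a quadratic double loop, B precomputes once the list of XOR masks with exactly bit_dif one-bits and, per i, generates the qualifying partners j = i ^ mask directly, filters them to [i, max_val] and sorts them to recover A's ascending emission order.
import Mathlib
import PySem

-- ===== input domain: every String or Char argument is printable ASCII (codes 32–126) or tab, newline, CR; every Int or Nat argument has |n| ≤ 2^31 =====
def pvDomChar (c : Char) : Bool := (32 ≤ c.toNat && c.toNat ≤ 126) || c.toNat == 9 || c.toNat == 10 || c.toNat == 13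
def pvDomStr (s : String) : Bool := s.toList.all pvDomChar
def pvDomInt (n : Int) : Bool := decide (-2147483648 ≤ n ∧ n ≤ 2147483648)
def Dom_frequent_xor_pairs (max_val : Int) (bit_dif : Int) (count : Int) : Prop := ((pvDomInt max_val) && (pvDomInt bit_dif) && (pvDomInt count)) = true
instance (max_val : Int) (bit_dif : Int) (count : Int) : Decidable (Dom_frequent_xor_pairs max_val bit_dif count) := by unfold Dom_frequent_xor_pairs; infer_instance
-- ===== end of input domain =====

-- B replaces A's quadratic pair scan by per-i partner generation from the precomputed
-- XOR masks with exactly bit_dif one-bits (objective: faster).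

-- ===== PORT A =====
-- bin(i ^ j).count('1') is exactly PySem.Int.bitCount (i ^ j) (here i ^ j ≥ 0);
-- [x] * count is PySem.List.pyRepeat [x] count.
def frequent_xor_pairs (max_val : Int) (bit_dif : Int) (count : Int) : List Int :=
  (PySem.List.pyRange 1 (max_val + 1) 1).foldl (fun pairs i =>
    (PySem.List.pyRange i (max_val + 1) 1).foldl (fun pairs j =>
      if (PySem.Int.bitCount (PySem.Int.bxor i j) : Int) = bit_dif then
        let pairs := pairs ++ PySem.List.pyRepeat [i] count
        if i ≠ j then pairs ++ PySem.List.pyRepeat [j] count else pairs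
      else pairs) pairs) []

-- ===== PORT B =====
def frequent_xor_pairs_alt (max_val : Int) (bit_dif : Int) (count : Int) : List Int :=
  if max_val < 1 then []
  else
    let width := PySem.Int.bitLength max_val
    let masks := (PySem.List.pyRange 0 ((1 : Int) <<< width) 1).filter
      (fun m => decide ((PySem.Int.bitCount m : Int) = bit_dif))
    (PySem.List.pyRange 1 (max_val + 1) 1).foldl (fun out i =>
      (PySem.List.sorted
        ((masks.filter (fun m =>
            decide (i ≤ PySem.Int.bxor i m ∧ PySem.Int.bxor i m ≤ max_val))).map
          (fun m => PySem.Int.bxor i m)) (fun x => x) false).foldl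
        (fun out j =>
          let out := out ++ PySem.List.pyRepeat [i] count
          if j ≠ i then out ++ PySem.List.pyRepeat [j] count else out) out) []

-- ===== PRECONDITION & SPEC =====
def Spec_frequent_xor_pairs (max_val : Int) (bit_dif : Int) (count : Int) (out : List Int) : Prop := out = frequent_xor_pairs_alt max_val bit_dif count
instance (max_val : Int) (bit_dif : Int) (count : Int) (out : List Int) : Decidable (Spec_frequent_xor_pairs max_val bit_dif count out) := by unfold Spec_frequent_xor_pairs; infer_instance

-- ===== CLAIM (what is proved, stated in full; the proofs are below) =====
def Claim_equal_frequent_xor_pairs : Prop := ∀ (max_val : Int) (bit_dif : Int) (count : Int), Dom_frequent_xor_pairs max_val bit_dif count → Spec_frequent_xor_pairs max_val bit_dif count (frequent_xor_pairs max_val bit_dif count)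

-- ===== LEMMAS AND PROOFS =====

-- xor of two nonnegative ints, recovered on the Nat side
theorem pv_bxor_cancel (i m : Int) (hi : 0 ≤ i) (hm : 0 ≤ m) :
    PySem.Int.bxor i (PySem.Int.bxor i m) = m := by
  rw [PySem.Int.bxor_of_nonneg hi hm]
  rw [PySem.Int.bxor_of_nonneg hi (by positivity)]
  simp [Nat.xor_xor_cancel_left]
  omega

-- the per-i partner list of B equals A's filtered inner range
theorem pv_inner_lists_eq (max_val bit_dif i : Int) (h1 : 1 ≤ i) (h2 : i ≤ max_val) :
    PySem.List.sorted
        ((((PySem.List.pyRange 0 ((1 : Int) <<< PySem.Int.bitLength max_val) 1).filter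
              (fun m => decide ((PySem.Int.bitCount m : Int) = bit_dif))).filter
            (fun m => decide (i ≤ PySem.Int.bxor i m ∧ PySem.Int.bxor i m ≤ max_val))).map
          (fun m => PySem.Int.bxor i m)) (fun x => x) false
      = (PySem.List.pyRange i (max_val + 1) 1).filter
          (fun j => decide ((PySem.Int.bitCount (PySem.Int.bxor i j) : Int) = bit_dif)) := by
  have hi0 : (0 : Int) ≤ i := by omega
  have hshift : (1 : Int) <<< PySem.Int.bitLength max_val
      = ((2 ^ PySem.Int.bitLength max_val : Nat) : Int) := by
    rw [Int.shiftLeft_eq]; push_cast; ring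
  -- every element of the mask range is nonneg and below 2^width
  have hmv : max_val.natAbs < 2 ^ PySem.Int.bitLength max_val :=
    PySem.Int.lt_two_pow_bitLength max_val
  apply PySem.List.sorted_eq_of_perm_of_pairwise_lt
  · -- permutation: both sides are Nodup with the same members
    apply (List.perm_ext_iff_of_nodup ?_ ?_).mpr
    · -- same membership
      intro j
      simp only [List.mem_filter, List.mem_map, PySem.List.mem_pyRange_one, decide_eq_true_eq]
      constructor
      · rintro ⟨⟨hij, hjlt⟩, hbc⟩
        have hj0 : (0 : Int) ≤ j := by omega
        refine ⟨PySem.Int.bxor i j, ⟨⟨⟨?_, ?_⟩, ?_⟩, ?_⟩, ?_⟩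
        · rw [PySem.Int.bxor_of_nonneg hi0 hj0]; positivity
        · rw [PySem.Int.bxor_of_nonneg hi0 hj0, hshift]
          exact_mod_cast Nat.xor_lt_two_pow
            (lt_of_le_of_lt (by omega) hmv) (lt_of_le_of_lt (by omega) hmv)
        · exact hbc
        · rw [pv_bxor_cancel i j hi0 hj0]; exact ⟨hij, by omega⟩
        · rw [pv_bxor_cancel i j hi0 hj0]
      · rintro ⟨m, ⟨⟨⟨hm0, _⟩, hbc⟩, him, hmx⟩, rfl⟩
        exact ⟨⟨him, by omega⟩, by rw [pv_bxor_cancel i m hi0 hm0]; exact hbc⟩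
    · exact (PySem.List.nodup_pyRange_one i _).filter _
    · -- the mapped list is Nodup: m ↦ i ^ m is injective on nonneg masks
      apply (List.nodup_map_iff_inj_on (((PySem.List.nodup_pyRange_one 0 _).filter _).filter _)).mpr
      intro m hm m' hm' heq
      have hm0 : (0 : Int) ≤ m := by
        have := (List.mem_filter.mp (List.mem_filter.mp hm).1).1
        exact ((PySem.List.mem_pyRange_one).mp this).1
      have hm0' : (0 : Int) ≤ m' := by
        have := (List.mem_filter.mp (List.mem_filter.mp hm').1).1
        exact ((PySem.List.mem_pyRange_one).mp this).1
      rw [PySem.Int.bxor_of_nonneg hi0 hm0, PySem.Int.bxor_of_nonneg hi0 hm0'] at heq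
      have : i.toNat ^^^ m.toNat = i.toNat ^^^ m'.toNat := by exact_mod_cast heq
      have : m.toNat = m'.toNat := by
        have h2 := congrArg (fun x => i.toNat ^^^ x) this
        simpa [Nat.xor_xor_cancel_left] using h2
      omega
  · -- A's filtered range is strictly increasing
    exact List.Pairwise.filter _ (PySem.List.pairwise_lt_pyRange_one i (max_val + 1))

theorem frequent_xor_pairs_eq (max_val bit_dif count : Int) :
    frequent_xor_pairs max_val bit_dif count = frequent_xor_pairs_alt max_val bit_dif count := by
  unfold frequent_xor_pairs frequent_xor_pairs_alt
  by_cases hmv : max_val < 1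
  · rw [if_pos hmv, PySem.List.pyRange_one_eq_nil (by omega)]
    rfl
  · rw [if_neg hmv]
    apply PySem.List.foldl_congr_mem'
    intro i hi acc
    obtain ⟨h1, h2⟩ := (PySem.List.mem_pyRange_one).mp hi
    rw [pv_inner_lists_eq max_val bit_dif i h1 (by omega), List.foldl_filter]
    apply PySem.List.foldl_congr_mem'
    intro j _ acc2
    by_cases hc : (PySem.Int.bitCount (PySem.Int.bxor i j) : Int) = bit_dif <;>
      by_cases hij : i = j <;> simp [hc, hij, Ne, eq_comm]

-- ===== VERDICT (by name: the statement is the Claim_ definition above) =====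
theorem frequent_xor_pairs_spec : Claim_equal_frequent_xor_pairs := by
  intro max_val bit_dif count _
  unfold Spec_frequent_xor_pairs
  exact frequent_xor_pairs_eq max_val bit_dif count
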